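-- pv_equiv track=rewrite | github.com/JiriJahn/engeto-projekt-1 | projekt_1.py | analyze_text
-- ===== SOURCE A (Python) =====
-- def analyze_text(text):
--     words = text.split()
--     word_lengths = [len(word.strip(".,!?")) for word in words]
--     word_stats = {
--         "word_count": len(words),
--         "titlecase_count": sum(1 for word in words if word.istitle()),
--         "uppercase_count": sum(1 for word in words if word.isupper()),
--         "lowercase_count": sum(1 for word in words if word.islower()),
--         "numeric_count": sum(1 for word in words if word.isdigit()),
--         "numeric_sum": sum(int(word) for word in words if word.isdigit())
--     }
--     return word_stats, word_lengths
-- ===== SOURCE B (Python) =====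
-- def _contrib(word):
--     stats = (1,
--              1 if word.istitle() else 0,
--              1 if word.isupper() else 0,
--              1 if word.islower() else 0,
--              1 if word.isdigit() else 0,
--              int(word) if word.isdigit() else 0)
--     return stats, [len(word.strip(".,!?"))]
--
-- def _merge(left, right):
--     (s1, l1), (s2, l2) = left, right
--     return tuple(a + b for a, b in zip(s1, s2)), l1 + l2
--
-- def _reduce(words):
--     if not words:
--         return (0, 0, 0, 0, 0, 0), []
--     if len(words) == 1:
--         return _contrib(words[0])
--     mid = len(words) // 2
--     return _merge(_reduce(words[:mid]), _reduce(words[mid:]))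
--
-- def analyze_text(text):
--     (wc, tc, uc, lc, nc, ns), word_lengths = _reduce(text.split())
--     return {
--         "word_count": wc,
--         "titlecase_count": tc,
--         "uppercase_count": uc,
--         "lowercase_count": lc,
--         "numeric_count": nc,
--         "numeric_sum": ns,
--     }, word_lengths
-- ===== Notes on version B (the rewrite author's own statement) =====
-- stated objective: alternative
-- what changed: Replaces A's seven sequential passes over the word list with a divide-and-conquer reduction: each word is mapped to a 6-tuple contribution plus its length, and results are merged by recursive halving of the list.
import Mathlib
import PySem

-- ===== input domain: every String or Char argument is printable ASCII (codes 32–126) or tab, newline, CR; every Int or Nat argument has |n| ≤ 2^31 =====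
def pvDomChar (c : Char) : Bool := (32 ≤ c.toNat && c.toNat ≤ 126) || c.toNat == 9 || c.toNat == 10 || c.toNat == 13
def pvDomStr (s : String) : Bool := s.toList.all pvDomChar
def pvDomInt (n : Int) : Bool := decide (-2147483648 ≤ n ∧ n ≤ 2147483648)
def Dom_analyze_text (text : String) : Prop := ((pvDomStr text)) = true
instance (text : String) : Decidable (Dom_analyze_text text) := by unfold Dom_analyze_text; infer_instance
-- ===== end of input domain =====

-- B replaces A's seven sequential passes by a divide-and-conquer reduction (per-word contribution tuples merged by recursive halving); same results (objective: alternative).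

-- shared helpers: Python's str.istitle / str.isupper / str.islower, exact on ASCII
-- str.istitle(): cased runs start upper then lower; hand-ported scan (prevCased flag, found flag)
def pyIstitleGo : List Char → Bool → Bool → Bool
  | [], _, found => found
  | c :: rest, prev, found =>
    if PySem.Chars.isupper c then
      if prev then false else pyIstitleGo rest true true
    else if PySem.Chars.islower c then
      if prev then pyIstitleGo rest true found else false
    else pyIstitleGo rest false found

def pyIstitle (s : String) : Bool := pyIstitleGo s.toList false false

-- str.isupper(): at least one cased char and no lowercase char (exact on ASCII)
def pyIsupper (s : String) : Bool :=
  s.toList.any (fun c => PySem.Chars.isupper c || PySem.Chars.islower c)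
    && s.toList.all (fun c => !PySem.Chars.islower c)

-- str.islower(): at least one cased char and no uppercase char (exact on ASCII)
def pyIslower (s : String) : Bool :=
  s.toList.any (fun c => PySem.Chars.isupper c || PySem.Chars.islower c)
    && s.toList.all (fun c => !PySem.Chars.isupper c)

-- int(word) for a word that passed isdigit; ofStr? never fails there, getD 0 unreachable
def pyToInt (s : String) : Int := (PySem.Int.ofStr? s).getD 0

-- ===== PORT A =====
def analyze_text (text : String) : (List (String × Int)) × List Int :=
  let words := PySem.Str.split₀ text
  let word_lengths := words.map (fun w => (PySem.Str.len (PySem.Str.stripChars w ".,!?") : Int))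
  let word_stats : List (String × Int) :=
    [ ("word_count", (words.length : Int)),
      ("titlecase_count", ((words.filter (fun w => pyIstitle w)).map (fun _ => (1 : Int))).sum),
      ("uppercase_count", ((words.filter (fun w => pyIsupper w)).map (fun _ => (1 : Int))).sum),
      ("lowercase_count", ((words.filter (fun w => pyIslower w)).map (fun _ => (1 : Int))).sum),
      ("numeric_count", ((words.filter (fun w => PySem.Str.strIsdigit w)).map (fun _ => (1 : Int))).sum),
      ("numeric_sum", ((words.filter (fun w => PySem.Str.strIsdigit w)).map pyToInt).sum) ]
  (word_stats, word_lengths)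

-- ===== PORT B =====
-- per-word contribution: a 6-tuple of stat increments plus the singleton lengths list
def contribWord (w : String) : (Int × Int × Int × Int × Int × Int) × List Int :=
  ((1,
    if pyIstitle w then 1 else 0,
    if pyIsupper w then 1 else 0,
    if pyIslower w then 1 else 0,
    if PySem.Str.strIsdigit w then 1 else 0,
    if PySem.Str.strIsdigit w then pyToInt w else 0),
   [(PySem.Str.len (PySem.Str.stripChars w ".,!?") : Int)])

-- merge two partial results: componentwise tuple addition, list concatenation
def mergeRes (l r : (Int × Int × Int × Int × Int × Int) × List Int) :
    (Int × Int × Int × Int × Int × Int) × List Int :=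
  ((l.1.1 + r.1.1, l.1.2.1 + r.1.2.1, l.1.2.2.1 + r.1.2.2.1, l.1.2.2.2.1 + r.1.2.2.2.1,
    l.1.2.2.2.2.1 + r.1.2.2.2.2.1, l.1.2.2.2.2.2 + r.1.2.2.2.2.2),
   l.2 ++ r.2)

-- divide-and-conquer reduction over the word list (recursive halving)
def reduceWords : List String → (Int × Int × Int × Int × Int × Int) × List Int
  | [] => ((0, 0, 0, 0, 0, 0), [])
  | [w] => contribWord w
  | w1 :: w2 :: rest =>
    let words := w1 :: w2 :: rest
    let mid := words.length / 2
    mergeRes (reduceWords (words.take mid)) (reduceWords (words.drop mid))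
  termination_by ws => ws.length
  decreasing_by
    · simp only [List.length_take, List.length_cons]; omega
    · simp only [List.length_drop, List.length_cons]; omega

def analyze_text_alt (text : String) : (List (String × Int)) × List Int :=
  let r := reduceWords (PySem.Str.split₀ text)
  ([ ("word_count", r.1.1),
     ("titlecase_count", r.1.2.1),
     ("uppercase_count", r.1.2.2.1),
     ("lowercase_count", r.1.2.2.2.1),
     ("numeric_count", r.1.2.2.2.2.1),
     ("numeric_sum", r.1.2.2.2.2.2) ],
   r.2)

-- ===== PRECONDITION & SPEC =====
def Spec_analyze_text (text : String) (out : (List (String × Int)) × List Int) : Prop := out = analyze_text_alt text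
instance (text : String) (out : (List (String × Int)) × List Int) : Decidable (Spec_analyze_text text out) := by unfold Spec_analyze_text; infer_instance

-- ===== CLAIM (what is proved, stated in full; the proofs are below) =====
def Claim_equal_analyze_text : Prop := ∀ (text : String), Dom_analyze_text text → Spec_analyze_text text (analyze_text text)

-- ===== LEMMAS AND PROOFS =====

-- A's closed forms, as one value of B's result type (proof-only helper)
def statsOf (words : List String) : (Int × Int × Int × Int × Int × Int) × List Int :=
  (((words.length : Int),
    ((words.filter (fun w => pyIstitle w)).map (fun _ => (1 : Int))).sum,
    ((words.filter (fun w => pyIsupper w)).map (fun _ => (1 : Int))).sum,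
    ((words.filter (fun w => pyIslower w)).map (fun _ => (1 : Int))).sum,
    ((words.filter (fun w => PySem.Str.strIsdigit w)).map (fun _ => (1 : Int))).sum,
    ((words.filter (fun w => PySem.Str.strIsdigit w)).map pyToInt).sum),
   words.map (fun w => (PySem.Str.len (PySem.Str.stripChars w ".,!?") : Int)))

theorem statsOf_append (l r : List String) :
    statsOf (l ++ r) = mergeRes (statsOf l) (statsOf r) := by
  simp [statsOf, mergeRes, List.filter_append, List.map_append]

theorem statsOf_singleton (w : String) : statsOf [w] = contribWord w := by
  simp only [statsOf, contribWord, List.filter_cons, List.filter_nil, List.map_cons, List.map_nil,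
    List.length_cons, List.length_nil]
  split_ifs <;> simp

theorem reduceWords_eq (words : List String) : reduceWords words = statsOf words := by
  induction words using reduceWords.induct with
  | case1 => simp [reduceWords, statsOf]
  | case2 w => rw [reduceWords, statsOf_singleton]
  | case3 w1 w2 rest x1 x2 ih1 ih2 =>
    rw [reduceWords]
    rw [ih1, ih2, ← statsOf_append, List.take_append_drop]

-- ===== VERDICT (by name: the statement is the Claim_ definition above) =====
theorem analyze_text_spec : Claim_equal_analyze_text := by
  intro text _
  show analyze_text text = analyze_text_alt text
  simp only [analyze_text, analyze_text_alt, reduceWords_eq, statsOf]
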